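-- pv_equiv track=rewrite | github.com/3dhanushkrishna/Task2FormulaQ | main.py | draw_pattern
-- ===== SOURCE A (Python) =====
-- def draw_pattern(word, lines):
--     result = ""
--     for i in range(lines):
--         result += " " * (lines - i - 1)
--         for k in range(i + 1):
--             result += word[(k + i) % len(word)] + " "
--         result += "<br>"
--     for i in range(lines - 2, -1, -1):
--         result += " " * (lines - i - 1)
--
--         for k in range(i + 1):
--             result += word[(k + i) % len(word)] + " "
--
--         result += "<br>"
--
--     return result
-- ===== SOURCE B (Python) =====
-- def draw_pattern(word, lines):
--     if lines <= 0:
--         return ""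
--     n = len(word)
--     ext = word * ((lines - 1) // n + 2)
--     parts = [" ".join(ext[(lines - 1) % n : (lines - 1) % n + lines]) + " <br>"]
--     for i in range(lines - 2, -1, -1):
--         r = " " * (lines - i - 1) + " ".join(ext[i % n : i % n + i + 1]) + " <br>"
--         parts = [r] + parts + [r]
--     return "".join(parts)
-- ===== Notes on version B (the rewrite author's own statement) =====
-- stated objective: alternative
-- what changed: B precomputes a repeated copy of the word and makes each row once by ' '.join over a cyclic slice of it (no per-character modulo loop), then builds the diamond middle-outward in a single loop that wraps a parts list (parts = [r] + parts + [r]) and joins it, instead of A's two independent top-down passes appending character by character.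
import Mathlib
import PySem

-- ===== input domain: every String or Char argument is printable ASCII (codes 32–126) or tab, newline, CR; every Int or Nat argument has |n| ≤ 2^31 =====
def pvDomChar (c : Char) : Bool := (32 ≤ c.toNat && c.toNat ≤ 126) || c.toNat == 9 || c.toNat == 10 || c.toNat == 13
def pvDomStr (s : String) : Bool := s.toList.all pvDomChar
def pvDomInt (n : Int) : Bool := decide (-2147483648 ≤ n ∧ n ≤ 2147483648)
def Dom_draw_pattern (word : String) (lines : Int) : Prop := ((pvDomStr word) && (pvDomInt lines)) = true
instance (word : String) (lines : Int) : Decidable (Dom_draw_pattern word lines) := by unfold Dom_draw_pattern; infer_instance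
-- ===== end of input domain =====

-- B precomputes a repeated copy of the word, makes each row once by joining a cyclic
-- slice of it, and builds the diamond middle-outward by wrapping the accumulator
-- (alternative structure, same cost).

-- ===== PORT A =====
-- A: one string accumulator, two full top-down passes (up then down), each row
-- appended character by character with a per-character modulo index.
def draw_pattern (word : String) (lines : Int) : String :=
  let w := word.toList
  let result : List Char := []
  let result := (PySem.List.pyRange 0 lines 1).foldl (fun result i =>
      let result := result ++ PySem.List.pyRepeat [' '] (lines - i - 1)
      let result := (PySem.List.pyRange 0 (i + 1) 1).foldl (fun result k =>
          result ++ ([PySem.List.pyGetD w (PySem.Int.mod (k + i) (PySem.List.len w)) ' '] ++ [' '])) result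
      result ++ "<br>".toList) result
  let result := (PySem.List.pyRange (lines - 2) (-1) (-1)).foldl (fun result i =>
      let result := result ++ PySem.List.pyRepeat [' '] (lines - i - 1)
      let result := (PySem.List.pyRange 0 (i + 1) 1).foldl (fun result k =>
          result ++ ([PySem.List.pyGetD w (PySem.Int.mod (k + i) (PySem.List.len w)) ' '] ++ [' '])) result
      result ++ "<br>".toList) result
  String.ofList result

-- ===== PORT B =====
-- B: ext = word * ((lines-1)//n + 2); each row is " ".join(ext[i%n : i%n+i+1]) + " <br>"
-- (" ".join over the characters of a string is exactly List.intersperse ' ' on the code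
-- points); the loop wraps the parts list: parts = [r] + parts + [r], from the apex out.
def draw_pattern_alt (word : String) (lines : Int) : String :=
  if lines ≤ 0 then "" else
    let w := word.toList
    let n := PySem.List.len w
    let ext := PySem.List.pyRepeat w (PySem.Int.floordiv (lines - 1) n + 2)
    let parts : List (List Char) := [List.intersperse ' '
        (PySem.List.slice ext (some (PySem.Int.mod (lines - 1) n))
          (some (PySem.Int.mod (lines - 1) n + lines))) ++ " <br>".toList]
    let parts := (PySem.List.pyRange (lines - 2) (-1) (-1)).foldl (fun parts i =>
        let r := PySem.List.pyRepeat [' '] (lines - i - 1)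
          ++ List.intersperse ' '
              (PySem.List.slice ext (some (PySem.Int.mod i n))
                (some (PySem.Int.mod i n + i + 1)))
          ++ " <br>".toList
        [r] ++ parts ++ [r]) parts
    -- "".join(parts) is exactly the concatenation of the parts
    String.ofList parts.flatten

-- ===== PRECONDITION & SPEC =====
-- Pre_ excludes exactly the inputs where Python A raises ZeroDivisionError
-- (empty word with at least one line requested); B raises there too.
def Pre_draw_pattern (word : String) (lines : Int) : Prop := word ≠ "" ∨ lines ≤ 0
instance (word : String) (lines : Int) : Decidable (Pre_draw_pattern word lines) := by
  unfold Pre_draw_pattern; infer_instance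

def pvWitness_draw_pattern : String × Int := ("ab", 3)

def Spec_draw_pattern (word : String) (lines : Int) (out : String) : Prop := out = draw_pattern_alt word lines
instance (word : String) (lines : Int) (out : String) : Decidable (Spec_draw_pattern word lines out) := by unfold Spec_draw_pattern; infer_instance

-- ===== CLAIM (what is proved, stated in full; the proofs are below) =====
def Claim_equal_draw_pattern : Prop := ∀ (word : String) (lines : Int), Dom_draw_pattern word lines → Pre_draw_pattern word lines → Spec_draw_pattern word lines (draw_pattern word lines)

-- ===== LEMMAS AND PROOFS =====

-- the characters of one row of the diamond (shared shape both proofs reduce to)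
def pvRow (w : List Char) (lines i : Int) : List Char :=
  PySem.List.pyRepeat [' '] (lines - i - 1)
  ++ ((PySem.List.pyRange 0 (i + 1) 1).flatMap (fun k =>
        [PySem.List.pyGetD w (PySem.Int.mod (k + i) (PySem.List.len w)) ' '] ++ [' '])
      ++ "<br>".toList)

theorem pv_A_eq (word : String) (lines : Int) :
    draw_pattern word lines
      = String.ofList
          ((PySem.List.pyRange 0 lines 1).flatMap (pvRow word.toList lines)
            ++ (PySem.List.pyRange (lines - 2) (-1) (-1)).flatMap (pvRow word.toList lines)) := by
  unfold draw_pattern pvRow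
  simp only [PySem.List.foldl_append_eq_flatMap, List.append_assoc, List.nil_append]

-- indexing into word * m is cyclic indexing into word
theorem pvRepGet (w : List Char) (m j : ℕ) (hj : j < m * w.length) (d : Char) :
    ((List.replicate m w).flatten).getD j d = w.getD (j % w.length) d := by
  induction m generalizing j with
  | zero => omega
  | succ m ih =>
    have hm : (m + 1) * w.length = m * w.length + w.length := by ring
    rw [hm] at hj
    rw [List.replicate_succ, List.flatten_cons]
    by_cases hjw : j < w.length
    · rw [List.getD_append _ _ _ _ hjw, Nat.mod_eq_of_lt hjw]
    · push_neg at hjw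
      rw [List.getD_append_right _ _ _ _ hjw, ih (j - w.length) (by omega),
        Nat.mod_eq_sub_mod hjw]

-- the cyclic slice of the repeated word is exactly the row's character comprehension
theorem pvSliceEq (w : List Char) (hw : w ≠ []) (lines i : Int) (h0 : 0 ≤ i) (hi : i < lines) :
    PySem.List.slice (PySem.List.pyRepeat w (PySem.Int.floordiv (lines - 1) (PySem.List.len w) + 2))
        (some (PySem.Int.mod i (PySem.List.len w)))
        (some (PySem.Int.mod i (PySem.List.len w) + i + 1))
      = (PySem.List.pyRange 0 (i + 1) 1).map
          (fun k => PySem.List.pyGetD w (PySem.Int.mod (k + i) (PySem.List.len w)) ' ') := by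
  have hL : 0 < w.length := List.length_pos_iff.mpr hw
  have hn : PySem.List.len w = ((w.length : Int)) := PySem.List.len_eq w
  have hn0 : (0:Int) < (w.length : Int) := by exact_mod_cast hL
  rw [hn, PySem.Int.mod_eq_emod_of_pos hn0, PySem.Int.floordiv_eq_ediv_of_pos hn0]
  have hs0 : 0 ≤ i % (w.length : Int) := Int.emod_nonneg i (by omega)
  have hsL : i % (w.length : Int) < (w.length : Int) := Int.emod_lt_of_pos i hn0
  have hq := Int.ediv_add_emod (lines - 1) (w.length : Int)
  have hr0 : 0 ≤ (lines - 1) % (w.length : Int) := Int.emod_nonneg _ (by omega)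
  have hrL : (lines - 1) % (w.length : Int) < (w.length : Int) := Int.emod_lt_of_pos _ hn0
  have hq0 : 0 ≤ (lines - 1) / (w.length : Int) := Int.ediv_nonneg (by omega) (by omega)
  have hrep : PySem.List.pyRepeat w ((lines - 1) / (w.length : Int) + 2)
      = (List.replicate ((lines - 1) / (w.length : Int) + 2).toNat w).flatten := rfl
  have hextlen : ((List.replicate ((lines - 1) / (w.length : Int) + 2).toNat w).flatten).length
      = ((lines - 1) / (w.length : Int) + 2).toNat * w.length := by
    simp [List.length_flatten, List.map_replicate, List.sum_replicate, smul_eq_mul]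
  have hcast : ((((lines - 1) / (w.length : Int) + 2).toNat * w.length : ℕ) : Int)
      = ((lines - 1) / (w.length : Int) + 2) * (w.length : Int) := by
    push_cast [Int.toNat_of_nonneg (by omega : (0:Int) ≤ (lines - 1) / (w.length : Int) + 2)]
    ring
  have hmul : ((lines - 1) / (w.length : Int) + 2) * (w.length : Int)
      = (w.length : Int) * ((lines - 1) / (w.length : Int)) + 2 * (w.length : Int) := by ring
  -- the repeated word is long enough for the slice
  have hbig : (i % (w.length : Int)).toNat + (i + 1).toNat
      ≤ ((lines - 1) / (w.length : Int) + 2).toNat * w.length := by omega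
  rw [PySem.List.slice_toNat _ hs0 (by omega)]
  have hT : (i % (w.length : Int) + i + 1).toNat - (i % (w.length : Int)).toNat = (i + 1).toNat := by
    omega
  rw [hT, hrep]
  apply List.ext_getElem
  · simp only [List.length_take, List.length_drop, hextlen, List.length_map,
      PySem.List.length_pyRange_one]
    omega
  · intro k h1 h2
    simp only [List.length_take, List.length_drop, hextlen] at h1
    rw [List.getElem_take, List.getElem_drop, List.getElem_map,
      PySem.List.getElem_pyRange_one]
    have hklt : k < (i + 1).toNat := by
      simp only [List.length_take, List.length_drop, hextlen] at h2
      omega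
    have hjlt : (i % (w.length : Int)).toNat + k
        < ((lines - 1) / (w.length : Int) + 2).toNat * w.length := by omega
    rw [← List.getD_eq_getElem _ ' ' (by rw [hextlen]; omega),
      pvRepGet _ _ _ hjlt ' ']
    simp only [zero_add]
    rw [PySem.Int.mod_eq_emod_of_pos hn0]
    have hb0 : 0 ≤ ((k : Int) + i) % (w.length : Int) := Int.emod_nonneg _ (by omega)
    have hbL : ((k : Int) + i) % (w.length : Int) < (w.length : Int) := Int.emod_lt_of_pos _ hn0
    rw [PySem.List.pyGetD_eq_getElem _ ' ' hb0 hbL]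
    rw [List.getD_eq_getElem _ ' ' (Nat.mod_lt _ hL)]
    congr 1
    -- ((i % L).toNat + k) % L = (((k : Int) + i) % L).toNat
    have h1 : ((((i % (w.length : Int)).toNat + k) % w.length : ℕ) : Int)
        = (((i % (w.length : Int)).toNat + k : ℕ) : Int) % (w.length : Int) :=
      Int.natCast_mod _ _
    have h2 : (((i % (w.length : Int)).toNat + k : ℕ) : Int) = i % (w.length : Int) + (k : Int) := by
      push_cast [Int.toNat_of_nonneg hs0]; ring
    have h3 : (i % (w.length : Int) + (k : Int)) % (w.length : Int)
        = (i + (k : Int)) % (w.length : Int) := Int.emod_add_emod _ _ _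
    have h4 : (i + (k : Int)) = ((k : Int) + i) := by ring
    rw [h2, h3, h4] at h1
    omega

-- " ".join(s) + " <br>" interleaves exactly one trailing space after each character
theorem pvInter (cs : List Char) (h : cs ≠ []) (rest : List Char) :
    List.intersperse ' ' cs ++ (' ' :: rest) = cs.flatMap (fun c => [c, ' ']) ++ rest := by
  induction cs with
  | nil => exact absurd rfl h
  | cons c cs ih =>
    cases cs with
    | nil => simp
    | cons c' cs' =>
      rw [List.intersperse_cons₂]
      simp only [List.flatMap_cons, List.cons_append, List.append_assoc]
      rw [ih (by simp)]
      simp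

-- B's row (as its port computes it) equals the shared row shape
theorem pvRowEq (w : List Char) (hw : w ≠ []) (lines i : Int) (h0 : 0 ≤ i) (hi : i < lines) :
    PySem.List.pyRepeat [' '] (lines - i - 1)
      ++ List.intersperse ' '
          (PySem.List.slice (PySem.List.pyRepeat w (PySem.Int.floordiv (lines - 1) (PySem.List.len w) + 2))
            (some (PySem.Int.mod i (PySem.List.len w)))
            (some (PySem.Int.mod i (PySem.List.len w) + i + 1)))
      ++ " <br>".toList
    = pvRow w lines i := by
  rw [pvSliceEq w hw lines i h0 hi]
  unfold pvRow
  have hlen : ((PySem.List.pyRange 0 (i + 1) 1).map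
      (fun k => PySem.List.pyGetD w (PySem.Int.mod (k + i) (PySem.List.len w)) ' ')) ≠ [] := by
    simp [PySem.List.pyRange_one_cons (show (0:Int) < i + 1 by omega)]
  have : (" <br>".toList : List Char) = ' ' :: "<br>".toList := rfl
  rw [this, List.append_assoc, pvInter _ hlen, List.flatMap_map]
  simp [Function.comp]

-- the middle-outward loop wraps each row around the parts list
theorem pvWrapRows (w : List Char) (hw : w ≠ []) (lines : Int) (l : List Int)
    (hmem : ∀ i ∈ l, 0 ≤ i ∧ i < lines) (acc : List (List Char)) :
    l.foldl (fun parts i =>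
        [PySem.List.pyRepeat [' '] (lines - i - 1)
          ++ List.intersperse ' '
              (PySem.List.slice (PySem.List.pyRepeat w (PySem.Int.floordiv (lines - 1) (PySem.List.len w) + 2))
                (some (PySem.Int.mod i (PySem.List.len w)))
                (some (PySem.Int.mod i (PySem.List.len w) + i + 1)))
          ++ " <br>".toList] ++ parts
        ++ [PySem.List.pyRepeat [' '] (lines - i - 1)
          ++ List.intersperse ' '
              (PySem.List.slice (PySem.List.pyRepeat w (PySem.Int.floordiv (lines - 1) (PySem.List.len w) + 2))
                (some (PySem.Int.mod i (PySem.List.len w)))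
                (some (PySem.Int.mod i (PySem.List.len w) + i + 1)))
          ++ " <br>".toList]) acc
      = l.reverse.map (pvRow w lines) ++ acc ++ l.map (pvRow w lines) := by
  induction l generalizing acc with
  | nil => simp
  | cons x xs ih =>
    simp only [List.foldl_cons, List.reverse_cons, List.map_append, List.map_cons,
      List.map_nil, List.append_nil]
    rw [ih (fun i hi => hmem i (by simp [hi])),
      pvRowEq w hw lines x (hmem x (by simp)).1 (hmem x (by simp)).2]
    simp [List.append_assoc]

theorem pv_B_eq (word : String) (lines : Int) (hw : word.toList ≠ []) (hl : 0 < lines) :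
    draw_pattern_alt word lines
      = String.ofList
          ((PySem.List.pyRange 0 lines 1).flatMap (pvRow word.toList lines)
            ++ (PySem.List.pyRange (lines - 2) (-1) (-1)).flatMap (pvRow word.toList lines)) := by
  unfold draw_pattern_alt
  rw [if_neg (by omega)]
  dsimp only
  rw [pvWrapRows word.toList hw lines _
    (fun i hi => by
      rcases PySem.List.mem_pyRange_neg_one.mp hi with ⟨h1, h2⟩
      exact ⟨by omega, by omega⟩) _]
  have hacc := pvRowEq word.toList hw lines (lines - 1) (by omega) (by omega)
  rw [show lines - (lines - 1) - 1 = 0 from by ring,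
    show PySem.Int.mod (lines - 1) (PySem.List.len word.toList) + (lines - 1) + 1
        = PySem.Int.mod (lines - 1) (PySem.List.len word.toList) + lines from by ring,
    show (PySem.List.pyRepeat [' '] 0 : List Char) = [] from rfl,
    List.nil_append] at hacc
  rw [hacc]
  rw [List.flatten_append, List.flatten_append, List.flatten_cons, List.flatten_nil,
    List.append_nil, ← List.flatMap_def, ← List.flatMap_def]
  have hrev : PySem.List.pyRange (lines - 2) (-1) (-1)
      = (PySem.List.pyRange 0 (lines - 1) 1).reverse := by
    rw [PySem.List.pyRange_neg_one_eq_reverse]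
    rw [show (-1 : Int) + 1 = 0 from by ring, show lines - 2 + 1 = lines - 1 from by ring]
  rw [hrev, List.reverse_reverse]
  have hsplit : PySem.List.pyRange 0 lines 1
      = PySem.List.pyRange 0 (lines - 1) 1 ++ [lines - 1] := by
    have h := PySem.List.pyRange_one_succ_right (a := 0) (b := lines - 1) (by omega)
    rw [show lines - 1 + 1 = lines from by ring] at h
    exact h
  rw [hsplit]
  simp [List.flatMap_append, List.append_assoc]

-- ===== VERDICT (by name: the statement is the Claim_ definition above) =====
theorem draw_pattern_spec : Claim_equal_draw_pattern := by
  intro word lines _ hpre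
  unfold Spec_draw_pattern
  by_cases hl : lines ≤ 0
  · rw [pv_A_eq]
    unfold draw_pattern_alt
    rw [if_pos hl, PySem.List.pyRange_one_eq_nil hl, PySem.List.pyRange_neg_one_eq_nil (by omega)]
    rfl
  · push_neg at hl
    have hw : word.toList ≠ [] := by
      rcases hpre with h | h
      · intro hc; exact h (String.toList_eq_nil_iff.mp hc)
      · omega
    rw [pv_A_eq, pv_B_eq word lines hw hl]
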